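-- pv_equiv track=rewrite | github.com/Jachm11/achavarria_computer_architecture_1_2022 | proyecto_2/program/initial_data_to_bin.py | search
-- ===== SOURCE A (Python) =====
-- def search(listed_text):
--     res = []
--     x=0
--     for i in listed_text:
--         if(i[0:2]=="0x"):
--             res.append(i[2:])
--             x=0
--     return res[1::2]
-- ===== SOURCE B (Python) =====
-- def search(listed_text):
--     # Two-phase scan over one shared iterator: discard one hex match, then emit
--     # the next one, repeating until the iterator is exhausted.
--     out = []
--     it = iter(listed_text)
--     while True:
--         for i in it:          # phase 1: skip (discard) one match
--             if i[0:2] == "0x":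
--                 break
--         else:
--             return out
--         for i in it:          # phase 2: emit the next match
--             if i[0:2] == "0x":
--                 out.append(i[2:])
--                 break
--         else:
--             return out
-- ===== Notes on version B (the rewrite author's own statement) =====
-- stated objective: alternative
-- what changed: Replaces A's filter-into-a-list followed by the res[1::2] slice with a two-phase state machine over a single shared iterator: an inner loop skips one hex match, a second inner loop emits the next match's tail, repeating; no intermediate list and no final slice.
import Mathlib
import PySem

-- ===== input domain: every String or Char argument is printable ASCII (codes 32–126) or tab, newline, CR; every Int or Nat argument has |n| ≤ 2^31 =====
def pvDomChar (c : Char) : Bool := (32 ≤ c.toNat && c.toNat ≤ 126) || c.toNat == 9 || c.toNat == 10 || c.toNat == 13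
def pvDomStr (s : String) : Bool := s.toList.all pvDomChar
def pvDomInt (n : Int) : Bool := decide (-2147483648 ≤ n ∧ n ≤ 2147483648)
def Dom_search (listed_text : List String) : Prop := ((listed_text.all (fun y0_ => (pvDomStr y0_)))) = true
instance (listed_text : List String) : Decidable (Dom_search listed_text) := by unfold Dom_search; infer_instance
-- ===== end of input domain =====

-- B replaces A's filter-then-slice-[1::2] with a two-phase state machine over the
-- remaining input: skip one hex match, emit the next, repeat (objective: alternative).

-- ===== PORT A =====
-- state: (res, x) — A keeps a dead variable x that it sets to 0 on every match
def search (listed_text : List String) : List String :=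
  -- res and the dead variable x form the fold state; res[1::2]: step 2 ≠ 0, so
  -- slice? is always some and the getD [] default is never taken
  (PySem.List.slice?
    (listed_text.foldl
      (fun (st : List String × Int) i =>
        if PySem.Str.slice i (some 0) (some 2) = "0x" then
          (st.1 ++ [PySem.Str.slice i (some 2) none], 0)
        else st)
      ([], 0)).1
    (some 1) none 2).getD []

-- ===== PORT B =====
-- mutual recursion = Source B's two inner for-loops over the shared iterator:
-- goSkip scans to (and discards) one match, goTake scans to the next and emits it
mutual
def goSkip : List String → List String
  | [] => []
  | i :: rest =>
    if PySem.Str.slice i (some 0) (some 2) = "0x" then goTake rest else goSkip rest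
def goTake : List String → List String
  | [] => []
  | i :: rest =>
    if PySem.Str.slice i (some 0) (some 2) = "0x" then
      PySem.Str.slice i (some 2) none :: goSkip rest
    else goTake rest
end

def search_alt (listed_text : List String) : List String := goSkip listed_text

-- ===== PRECONDITION & SPEC =====
def Spec_search (listed_text : List String) (out : List String) : Prop := out = search_alt listed_text
instance (listed_text : List String) (out : List String) : Decidable (Spec_search listed_text out) := by unfold Spec_search; infer_instance

-- ===== CLAIM (what is proved, stated in full; the proofs are below) =====
def Claim_equal_search : Prop := ∀ (listed_text : List String), Dom_search listed_text → Spec_search listed_text (search listed_text)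

-- ===== LEMMAS AND PROOFS =====

-- the odd-indexed elements of a list (elements at indices 1, 3, 5, …)
def oddIdx {α : Type} : List α → List α
  | [] => []
  | [_] => []
  | _ :: b :: l => b :: oddIdx l

-- the tails of the hex matches of xs
def matchTails (xs : List String) : List String :=
  (xs.filter (fun i => PySem.Str.slice i (some 0) (some 2) = "0x")).map
    (fun i => PySem.Str.slice i (some 2) none)

-- A's loop accumulates the tails of all matches
theorem searchA_loop (xs : List String) :
    ∀ (acc : List String) (x : Int),
      (xs.foldl (fun (st : List String × Int) i =>
          if PySem.Str.slice i (some 0) (some 2) = "0x" then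
            (st.1 ++ [PySem.Str.slice i (some 2) none], 0)
          else st) (acc, x)).1
        = acc ++ matchTails xs := by
  induction xs with
  | nil => intro acc x; simp [matchTails]
  | cons i xs ih =>
    intro acc x
    by_cases h : PySem.Str.slice i (some 0) (some 2) = "0x" <;>
      simp [List.foldl_cons, h, ih, matchTails]

-- B's two phases compute the odd-indexed tails of the match list
theorem goB_eq (xs : List String) :
    goSkip xs = oddIdx (matchTails xs) ∧
    goTake xs = (match matchTails xs with
                 | [] => []
                 | a :: l => a :: oddIdx l) := by
  induction xs with
  | nil => simp [goSkip, goTake, matchTails, oddIdx]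
  | cons i xs ih =>
    by_cases h : PySem.Str.slice i (some 0) (some 2) = "0x"
    · have hm2 : matchTails (i :: xs)
          = PySem.Str.slice i (some 2) none :: matchTails xs := by simp [matchTails, h]
      constructor
      · rw [show goSkip (i :: xs) = goTake xs by simp [goSkip, h], ih.2, hm2]
        cases matchTails xs <;> simp [oddIdx]
      · rw [show goTake (i :: xs) = PySem.Str.slice i (some 2) none :: goSkip xs by
            simp [goTake, h], ih.1, hm2]
    · have hm : matchTails (i :: xs) = matchTails xs := by simp [matchTails, h]
      rw [show goSkip (i :: xs) = goSkip xs by simp [goSkip, h],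
          show goTake (i :: xs) = goTake xs by simp [goTake, h], hm]
      exact ih

theorem filterMap_odd {α : Type} : ∀ (l : List α),
    (List.range (l.length / 2)).filterMap (fun k => l[1 + 2 * k]?) = oddIdx l := by
  intro l
  induction l using oddIdx.induct with
  | case1 => simp [oddIdx]
  | case2 a => simp [oddIdx]
  | case3 a b l ih =>
    have hlen : (a :: b :: l).length / 2 = l.length / 2 + 1 := by
      simp [List.length_cons]; omega
    have hsh : ∀ k : ℕ, (a :: b :: l)[1 + 2 * (k + 1)]? = l[1 + 2 * k]? := by
      intro k
      have h : 1 + 2 * (k + 1) = (1 + 2 * k) + 1 + 1 := by omega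
      rw [h]
      simp
    rw [hlen, List.range_succ_eq_map]
    simp only [List.filterMap_cons, List.filterMap_map, Function.comp_def,
      Nat.succ_eq_add_one, hsh]
    simp [oddIdx, ih]

-- res[1::2] = the odd-indexed elements
theorem slice?_one_none_two {α : Type} (l : List α) :
    PySem.List.slice? l (some 1) none 2 = some (oddIdx l) := by
  cases l with
  | nil => simp [PySem.List.slice?, PySem.List.sliceIndices, oddIdx]
  | cons a l0 =>
    simp only [PySem.List.slice?, PySem.List.sliceIndices]
    norm_num
    have hcount : (if 0 < l0.length then (((l0.length : Int) + 2 - 1) / 2).toNat else 0)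
        = (a :: l0).length / 2 := by
      split_ifs with h
      · simp only [List.length_cons]; omega
      · simp only [List.length_cons]; omega
    rw [hcount]
    have harg : (fun k : ℕ => (a :: l0)[((1 : Int) + 2 * (k : Int)).toNat]?)
        = fun k : ℕ => (a :: l0)[1 + 2 * k]? := by
      funext k
      have h2 : ((1 : Int) + 2 * (k : Int)).toNat = 1 + 2 * k := by omega
      rw [h2]
    rw [harg, filterMap_odd]

-- ===== VERDICT (by name: the statement is the Claim_ definition above) =====
theorem search_spec : Claim_equal_search := by
  intro listed_text _
  unfold Spec_search search search_alt
  rw [searchA_loop, slice?_one_none_two, (goB_eq listed_text).1]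
  simp
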